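-- pv_equiv track=rewrite | github.com/dongkam5/python_prac | prac408.py | solution
-- ===== SOURCE A (Python) =====
-- def solution(n):
--     answer = 0
--     dp = [0]*(n+1)
--     dp[1] = 1
--     for i in range(2, n+1):
--         dp[i] = (2*dp[i-1]+dp[i-2]) % 1000000007
--     answer = dp[n]
--     return answer
-- ===== SOURCE B (Python) =====
-- def solution(n):
--     # nth Pell number mod 1e9+7 via 2x2 matrix exponentiation by squaring
--     M = 1000000007
--
--     def mul(X, Y):
--         a, b, c, d = X
--         e, f, g, h = Y
--         return ((a*e + b*g) % M, (a*f + b*h) % M,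
--                 (c*e + d*g) % M, (c*f + d*h) % M)
--
--     r = (1, 0, 0, 1)          # identity
--     m = (2, 1, 1, 0)          # [[2,1],[1,0]]
--     e = n
--     while e > 0:
--         if e % 2 == 1:
--             r = mul(r, m)
--         m = mul(m, m)
--         e //= 2
--     return r[1]
-- ===== Notes on version B (the rewrite author's own statement) =====
-- stated objective: faster
-- what changed: Replaced the O(n) DP table over the Pell-like recurrence dp[i]=2*dp[i-1]+dp[i-2] mod 1e9+7 with 2x2 matrix exponentiation by repeated squaring, O(log n) and O(1) memory.
import Mathlib
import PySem

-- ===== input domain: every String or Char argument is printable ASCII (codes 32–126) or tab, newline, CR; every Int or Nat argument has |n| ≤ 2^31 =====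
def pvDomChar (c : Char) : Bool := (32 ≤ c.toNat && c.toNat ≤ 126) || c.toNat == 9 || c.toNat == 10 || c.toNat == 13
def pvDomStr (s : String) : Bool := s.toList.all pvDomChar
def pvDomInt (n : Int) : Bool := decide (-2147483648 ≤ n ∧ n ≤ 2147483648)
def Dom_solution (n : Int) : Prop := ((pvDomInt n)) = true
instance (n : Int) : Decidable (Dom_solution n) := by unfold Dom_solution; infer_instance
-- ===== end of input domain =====

-- B replaces A's O(n) DP table for dp[i] = 2*dp[i-1] + dp[i-2] mod 1e9+7 by 2x2 matrix
-- exponentiation by squaring (objective: faster).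

-- ===== PORT A =====
-- loop body of 'for i in range(2, n+1): dp[i] = (2*dp[i-1]+dp[i-2]) % 1000000007'
def pvStep (dp : Array Int) (i : Int) : Array Int :=
  dp.setIfInBounds i.toNat
    (PySem.Int.mod (2 * dp.getD (i - 1).toNat 0 + dp.getD (i - 2).toNat 0) 1000000007)

def solution (n : Int) : Int :=
  let dp := Array.replicate (n + 1).toNat (0 : Int)
  let dp := dp.setIfInBounds (1 : Nat) 1
  let dp := (PySem.List.pyRange 2 (n + 1) 1).foldl pvStep dp
  dp.getD n.toNat 0

-- ===== PORT B =====
-- 2x2 matrix as (a, b, c, d) = [[a, b], [c, d]]; entries kept reduced mod 1e9+7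
def pellMul (X Y : Int × Int × Int × Int) : Int × Int × Int × Int :=
  (PySem.Int.mod (X.1 * Y.1 + X.2.1 * Y.2.2.1) 1000000007,
   PySem.Int.mod (X.1 * Y.2.1 + X.2.1 * Y.2.2.2) 1000000007,
   PySem.Int.mod (X.2.2.1 * Y.1 + X.2.2.2 * Y.2.2.1) 1000000007,
   PySem.Int.mod (X.2.2.1 * Y.2.1 + X.2.2.2 * Y.2.2.2) 1000000007)

-- the 'while e > 0' squaring loop, ported as structural recursion on a fuel bound (fuel = e
-- suffices since e halves each step; the fuel only makes the same computation total).
-- The loop runs iff the Python int e = n is > 0, so e is passed as n.toNat.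
def pellPow (fuel : Nat) (r m : Int × Int × Int × Int) (e : Nat) : Int × Int × Int × Int :=
  match fuel with
  | 0 => r
  | f + 1 =>
    if e = 0 then r
    else pellPow f (if e % 2 = 1 then pellMul r m else r) (pellMul m m) (e / 2)

def solution_alt (n : Int) : Int :=
  (pellPow n.toNat (1, 0, 0, 1) (2, 1, 1, 0) n.toNat).2.1    -- return r[1]

-- ===== PRECONDITION & SPEC =====
-- Pre_: for n ≤ 0 the Python A raises IndexError at 'dp[1] = 1' (list of length ≤ 1)
def Pre_solution (n : Int) : Prop := 1 ≤ n
instance (n : Int) : Decidable (Pre_solution n) := by unfold Pre_solution; infer_instance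
def pvWitness_solution : Int := 5

def Spec_solution (n : Int) (out : Int) : Prop := out = solution_alt n
instance (n : Int) (out : Int) : Decidable (Spec_solution n out) := by unfold Spec_solution; infer_instance

-- ===== CLAIM (what is proved, stated in full; the proofs are below) =====
def Claim_equal_solution : Prop := ∀ (n : Int), Dom_solution n → Pre_solution n → Spec_solution n (solution n)

-- ===== LEMMAS AND PROOFS =====
-- the Pell sequence (over Int); both programs compute pell n % 1000000007
def pell : Nat → Int
  | 0 => 0
  | 1 => 1
  | k + 2 => 2 * pell (k + 1) + pell k

-- ---- A side: solution n = pell n.toNat % 1000000007 ----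
theorem arr_getD (dp : Array Int) (j : Nat) (h : j < dp.size) : dp.getD j 0 = dp[j] := by
  rw [Array.getD_eq_getD_getElem?, Array.getElem?_eq_getElem h]
  rfl

theorem loopInv (N : Nat) (h1 : 1 ≤ N) (k : Nat) (hk : k ≤ N - 1) :
    ((PySem.List.pyRange 2 (2 + (k : Int)) 1).foldl pvStep
        ((Array.replicate (N + 1) (0 : Int)).setIfInBounds 1 1)).size = N + 1 ∧
    ∀ j : Nat, j ≤ k + 1 →
      ((PySem.List.pyRange 2 (2 + (k : Int)) 1).foldl pvStep
        ((Array.replicate (N + 1) (0 : Int)).setIfInBounds 1 1)).getD j 0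
        = pell j % 1000000007 := by
  induction k with
  | zero =>
    rw [show (2 + ((0:Nat) : Int)) = 2 from by norm_num, PySem.List.pyRange_one_eq_nil le_rfl]
    simp only [List.foldl_nil]
    refine ⟨by simp, ?_⟩
    intro j hj
    interval_cases j
    · rw [arr_getD _ _ (by simp), Array.getElem_setIfInBounds (by simp)]
      simp [pell]
    · rw [arr_getD _ _ (by simp; omega), Array.getElem_setIfInBounds (by simp; omega)]
      simp [pell]
  | succ k ih =>
    have hk' : k ≤ N - 1 := by omega
    obtain ⟨ihlen, ihval⟩ := ih hk'
    rw [show (2 + ((k+1:Nat) : Int)) = (2 + (k:Int)) + 1 from by push_cast; ring,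
        PySem.List.pyRange_one_succ_right (by omega), List.foldl_append]
    simp only [List.foldl_cons, List.foldl_nil]
    set L := (PySem.List.pyRange 2 (2 + (k : Int)) 1).foldl pvStep
        ((Array.replicate (N + 1) (0 : Int)).setIfInBounds 1 1) with hL
    have hstep : pvStep L (2 + (k:Int)) =
        L.setIfInBounds (k + 2)
          ((2 * (pell (k+1) % 1000000007) + pell k % 1000000007) % 1000000007) := by
      rw [pvStep]
      rw [show ((2 + (k:Int)) - 1).toNat = k + 1 from by omega,
          show ((2 + (k:Int)) - 2).toNat = k from by omega,
          show (2 + (k:Int)).toNat = k + 2 from by omega]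
      rw [ihval (k+1) le_rfl, ihval k (by omega),
          PySem.Int.mod_eq_emod_of_pos (by norm_num)]
    rw [hstep]
    refine ⟨by simp [ihlen], ?_⟩
    intro j hj
    rw [arr_getD _ _ (by simp [Array.size_setIfInBounds, ihlen]; omega),
        Array.getElem_setIfInBounds (by simp [ihlen]; omega)]
    by_cases hje : k + 2 = j
    · rw [if_pos hje, ← hje]
      have : pell (k + 2) = 2 * pell (k + 1) + pell k := rfl
      omega
    · rw [if_neg hje, ← arr_getD _ _ (by simp [ihlen]; omega)]
      exact ihval j (by omega)

theorem solution_eq_pell (n : Int) (hn : 1 ≤ n) :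
    solution n = pell n.toNat % 1000000007 := by
  obtain ⟨N, hN⟩ : ∃ N : Nat, n = (N : Int) := ⟨n.toNat, (Int.toNat_of_nonneg (by omega)).symm⟩
  subst hN
  have h1 : 1 ≤ N := by exact_mod_cast hn
  simp only [solution]
  rw [show ((N:Int) + 1).toNat = N + 1 from by omega,
      show ((N:Int) + 1) = 2 + ((N - 1 : Nat) : Int) from by
        push_cast [Nat.cast_sub h1]; ring,
      Int.toNat_natCast]
  exact (loopInv N h1 (N-1) le_rfl).2 N (by omega)

-- ---- B side: solution_alt n = pell n.toNat % 1000000007 ----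
theorem castmod (x : Int) : ((x % 1000000007 : Int) : ZMod 1000000007) = (x : ZMod 1000000007) := by
  have := ZMod.intCast_mod x 1000000007
  norm_num at this
  exact this

def toM (X : Int × Int × Int × Int) : Matrix (Fin 2) (Fin 2) (ZMod 1000000007) :=
  !![(X.1 : ZMod 1000000007), (X.2.1 : ZMod 1000000007);
     (X.2.2.1 : ZMod 1000000007), (X.2.2.2 : ZMod 1000000007)]

theorem toM_pellMul (X Y : Int × Int × Int × Int) : toM (pellMul X Y) = toM X * toM Y := by
  simp [toM, pellMul, castmod]

theorem toM_pellPow (fuel : Nat) (r m : Int × Int × Int × Int) (e : Nat) (he : e ≤ fuel) :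
    toM (pellPow fuel r m e) = toM r * (toM m) ^ e := by
  induction fuel generalizing r m e with
  | zero =>
    interval_cases e
    simp [pellPow]
  | succ f ih =>
    rw [pellPow]
    by_cases h0 : e = 0
    · simp [h0]
    · rw [if_neg h0, ih _ _ _ (by omega), toM_pellMul m m, ← pow_two, ← pow_mul]
      conv_rhs => rw [show e = e % 2 + 2 * (e / 2) from by omega, pow_add]
      by_cases hpar : e % 2 = 1
      · rw [if_pos hpar, toM_pellMul, hpar, pow_one, mul_assoc]
      · rw [if_neg hpar, show e % 2 = 0 from by omega, pow_zero, one_mul]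

theorem pellMat_pow (e : Nat) :
    (!![(2 : ZMod 1000000007), 1; 1, 0]) ^ (e + 1) =
      !![((pell (e + 2) : Int) : ZMod 1000000007), ((pell (e + 1) : Int) : ZMod 1000000007);
         ((pell (e + 1) : Int) : ZMod 1000000007), ((pell e : Int) : ZMod 1000000007)] := by
  induction e with
  | zero => norm_num [pell]
  | succ k ih =>
    rw [pow_succ, ih, Matrix.mul_fin_two]
    have h3 : pell (k + 1 + 2) = 2 * pell (k + 2) + pell (k + 1) := rfl
    have h2 : pell (k + 2) = 2 * pell (k + 1) + pell k := rfl
    ext i j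
    fin_cases i <;> fin_cases j <;> simp [h3, h2] <;> ring

def Bounded (X : Int × Int × Int × Int) : Prop :=
  (0 ≤ X.1 ∧ X.1 < 1000000007) ∧ (0 ≤ X.2.1 ∧ X.2.1 < 1000000007) ∧
  (0 ≤ X.2.2.1 ∧ X.2.2.1 < 1000000007) ∧ (0 ≤ X.2.2.2 ∧ X.2.2.2 < 1000000007)

theorem bounded_pellMul (X Y : Int × Int × Int × Int) : Bounded (pellMul X Y) := by
  have hp : (0 : Int) < 1000000007 := by norm_num
  exact ⟨⟨PySem.Int.mod_nonneg _ hp, PySem.Int.mod_lt _ hp⟩,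
         ⟨PySem.Int.mod_nonneg _ hp, PySem.Int.mod_lt _ hp⟩,
         ⟨PySem.Int.mod_nonneg _ hp, PySem.Int.mod_lt _ hp⟩,
         ⟨PySem.Int.mod_nonneg _ hp, PySem.Int.mod_lt _ hp⟩⟩

theorem pellPow_zero (fuel : Nat) (r m : Int × Int × Int × Int) : pellPow fuel r m 0 = r := by
  cases fuel <;> rfl

theorem bounded_pellPow (fuel : Nat) (r m : Int × Int × Int × Int) (e : Nat) (he : e ≠ 0)
    (hf : e ≤ fuel) : Bounded (pellPow fuel r m e) := by
  induction fuel generalizing r m e with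
  | zero => omega
  | succ f ih =>
    rw [pellPow, if_neg he]
    by_cases h2 : e / 2 = 0
    · have he1 : e = 1 := by omega
      rw [h2, pellPow_zero, he1]
      simpa using bounded_pellMul r m
    · exact ih _ _ _ h2 (by omega)

theorem solution_alt_eq_pell (n : Int) (hn : 1 ≤ n) :
    solution_alt n = pell n.toNat % 1000000007 := by
  obtain ⟨N, hN⟩ : ∃ N : Nat, n = (N : Int) := ⟨n.toNat, (Int.toNat_of_nonneg (by omega)).symm⟩
  subst hN
  have h1 : 1 ≤ N := by exact_mod_cast hn
  simp only [solution_alt, Int.toNat_natCast]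
  set X := pellPow N (1, 0, 0, 1) (2, 1, 1, 0) N with hX
  have hb : Bounded X := bounded_pellPow N _ _ N (by omega) le_rfl
  have hM : toM X = toM (1, 0, 0, 1) * toM (2, 1, 1, 0) ^ N := toM_pellPow N _ _ N le_rfl
  have hid : toM (1, 0, 0, 1) = (1 : Matrix (Fin 2) (Fin 2) (ZMod 1000000007)) := by
    simp [toM, Matrix.one_fin_two]
  have hbase : toM (2, 1, 1, 0) = !![(2 : ZMod 1000000007), 1; 1, 0] := by
    simp [toM]
  rw [hid, hbase, one_mul, show N = (N - 1) + 1 from by omega, pellMat_pow (N - 1)] at hM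
  have hentry := congrFun (congrFun hM 0) 1
  simp only [toM, Matrix.cons_val', Matrix.cons_val_zero, Matrix.cons_val_one,
    Matrix.cons_val_fin_one, Matrix.of_apply] at hentry
  have hmod := (ZMod.intCast_eq_intCast_iff _ _ _).mp hentry
  unfold Int.ModEq at hmod
  norm_num at hmod
  rw [show (N - 1) + 1 = N from by omega] at hmod
  obtain ⟨_, ⟨hb1, hb2⟩, _, _⟩ := hb
  omega

-- ===== VERDICT (by name: the statement is the Claim_ definition above) =====
theorem solution_spec : Claim_equal_solution := by
  intro n _ hn
  unfold Spec_solution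
  rw [solution_eq_pell n hn, solution_alt_eq_pell n hn]
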